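-- pv_equiv track=rewrite | github.com/pastuszko28/Venom | venom_core/api/routes/academy_models.py | discover_available_runtime_targets
-- ===== SOURCE A (Python) =====
-- from typing import Any, Dict, List, Literal, Optional, Set
--
-- LOCAL_RUNTIME_PREFERENCE = ("vllm", "ollama", "onnx")
--
-- def _canonical_local_runtime_id(value: str) -> Optional[str]:
--     normalized = value.strip().lower()
--     if normalized in {"vllm", "ollama", "onnx"}:
--         return normalized
--     return None
--
-- def discover_available_runtime_targets(local_models: List[Dict[str, Any]]) -> List[str]:
--     """Discover runtime targets from actually available local model stack."""
--     discovered: Set[str] = set()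
--     for model in local_models:
--         candidates = (
--             str(model.get("runtime") or ""),
--             str(model.get("provider") or ""),
--             str(model.get("source") or ""),
--         )
--         for candidate in candidates:
--             runtime_id = _canonical_local_runtime_id(candidate)
--             if runtime_id:
--                 discovered.add(runtime_id)
--     ordered = [runtime for runtime in LOCAL_RUNTIME_PREFERENCE if runtime in discovered]
--     return ordered
-- ===== SOURCE B (Python) =====
-- from typing import Any, Dict, List
--
-- LOCAL_RUNTIME_PREFERENCE = ("vllm", "ollama", "onnx")
--
-- def _model_fields(model):
--     return (
--         str(model.get("runtime") or ""),
--         str(model.get("provider") or ""),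
--         str(model.get("source") or ""),
--     )
--
-- def discover_available_runtime_targets(local_models: List[Dict[str, Any]]) -> List[str]:
--     """Discover runtime targets from actually available local model stack."""
--     return [
--         runtime
--         for runtime in LOCAL_RUNTIME_PREFERENCE
--         if any(
--             field.strip().lower() == runtime
--             for model in local_models
--             for field in _model_fields(model)
--         )
--     ]
-- ===== Notes on version B (the rewrite author's own statement) =====
-- stated objective: simpler
-- what changed: B drops the discovered-set-building pass entirely: it iterates the preference list and for each runtime rescans the models, comparing each canonicalized field directly against that runtime id, instead of first folding an intermediate set and then filtering the preference list against it.
import Mathlib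
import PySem

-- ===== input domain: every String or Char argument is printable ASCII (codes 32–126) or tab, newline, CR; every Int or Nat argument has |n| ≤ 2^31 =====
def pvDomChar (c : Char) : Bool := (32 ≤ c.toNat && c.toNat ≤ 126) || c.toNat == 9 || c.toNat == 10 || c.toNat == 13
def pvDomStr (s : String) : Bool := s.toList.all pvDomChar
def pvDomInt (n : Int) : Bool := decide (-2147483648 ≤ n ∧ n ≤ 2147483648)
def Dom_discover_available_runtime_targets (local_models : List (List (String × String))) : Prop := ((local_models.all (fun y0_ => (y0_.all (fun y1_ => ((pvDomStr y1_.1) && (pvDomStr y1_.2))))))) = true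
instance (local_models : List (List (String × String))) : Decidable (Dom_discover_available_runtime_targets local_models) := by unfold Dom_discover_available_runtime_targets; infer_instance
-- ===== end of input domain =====

-- B replaces A's index-building pass (fold all models into a discovered set, then filter
-- the preference list against it) by a preference-driven rescan with no intermediate set.

-- ===== PORT A =====
-- str(model.get(k) or ""): a missing key gives None -> "", an empty string stays ""; both are the first-match lookup with default "".
def pvField (m : List (String × String)) (k : String) : String :=
  (PySem.Dict.mk m).getD k ""

-- _canonical_local_runtime_id
def pvCanon (value : String) : Option String :=
  let normalized := PySem.Str.lower (PySem.Str.strip value)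
  if normalized = "vllm" ∨ normalized = "ollama" ∨ normalized = "onnx" then some normalized
  else none

-- body of A's inner 'for candidate in candidates' loop
def pvInnerStep (d : PySem.Set String) (candidate : String) : PySem.Set String :=
  match pvCanon candidate with
  | some runtime_id => if runtime_id = "" then d else PySem.Set.add d runtime_id  -- `if runtime_id:`
  | none => d

-- body of A's outer 'for model in local_models' loop
def pvModelStep (d : PySem.Set String) (model : List (String × String)) : PySem.Set String :=
  [pvField model "runtime", pvField model "provider", pvField model "source"].foldl pvInnerStep d

def discover_available_runtime_targets (local_models : List (List (String × String))) : List String :=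
  let discovered : PySem.Set String := local_models.foldl pvModelStep PySem.Set.empty
  ["vllm", "ollama", "onnx"].filter (fun runtime => PySem.Set.contains discovered runtime)

-- ===== PORT B =====
def discover_available_runtime_targets_alt (local_models : List (List (String × String))) : List String :=
  ["vllm", "ollama", "onnx"].filter (fun runtime =>
    local_models.any (fun model =>
      [pvField model "runtime", pvField model "provider", pvField model "source"].any
        (fun field => PySem.Str.lower (PySem.Str.strip field) == runtime)))

-- ===== PRECONDITION & SPEC =====
def Spec_discover_available_runtime_targets (local_models : List (List (String × String))) (out : List String) : Prop := out = discover_available_runtime_targets_alt local_models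
instance (local_models : List (List (String × String))) (out : List String) : Decidable (Spec_discover_available_runtime_targets local_models out) := by unfold Spec_discover_available_runtime_targets; infer_instance

-- ===== CLAIM (what is proved, stated in full; the proofs are below) =====
def Claim_equal_discover_available_runtime_targets : Prop := ∀ (local_models : List (List (String × String))), Dom_discover_available_runtime_targets local_models → Spec_discover_available_runtime_targets local_models (discover_available_runtime_targets local_models)

-- ===== LEMMAS AND PROOFS =====

-- one candidate: the inner-loop body adds exactly the canonical ids, for canonical r
theorem pv_mem_innerStep (r : String) (hr : r = "vllm" ∨ r = "ollama" ∨ r = "onnx")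
    (d : PySem.Set String) (c : String) :
    r ∈ pvInnerStep d c ↔ (r ∈ d ∨ PySem.Str.lower (PySem.Str.strip c) = r) := by
  unfold pvInnerStep pvCanon
  by_cases h : PySem.Str.lower (PySem.Str.strip c) = "vllm" ∨
      PySem.Str.lower (PySem.Str.strip c) = "ollama" ∨ PySem.Str.lower (PySem.Str.strip c) = "onnx"
  · have h0 : PySem.Str.lower (PySem.Str.strip c) ≠ "" := by rcases h with h|h|h <;> simp [h]
    simp only [h, if_true, if_neg h0, PySem.Set.mem_add]
    rw [eq_comm (a := r)]
  · have hne : PySem.Str.lower (PySem.Str.strip c) ≠ r := fun he => h (he ▸ hr)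
    simp [h, hne]

-- one model: the discovered set grows by the models whose fields canonicalize to r
theorem pv_mem_modelStep (r : String) (hr : r = "vllm" ∨ r = "ollama" ∨ r = "onnx")
    (d : PySem.Set String) (m : List (String × String)) :
    r ∈ pvModelStep d m ↔ (r ∈ d ∨
      ∃ c ∈ [pvField m "runtime", pvField m "provider", pvField m "source"],
        PySem.Str.lower (PySem.Str.strip c) = r) := by
  unfold pvModelStep
  rw [List.foldl_cons, List.foldl_cons, List.foldl_cons, List.foldl_nil]
  rw [pv_mem_innerStep r hr, pv_mem_innerStep r hr, pv_mem_innerStep r hr]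
  simp only [List.mem_cons, List.not_mem_nil, or_false, exists_eq_or_imp, exists_eq_left]
  rw [or_assoc, or_assoc]

-- the whole fold: membership in A's discovered set, for canonical r
theorem pv_mem_discovered (r : String) (hr : r = "vllm" ∨ r = "ollama" ∨ r = "onnx")
    (lms : List (List (String × String))) (d : PySem.Set String) :
    r ∈ lms.foldl pvModelStep d ↔ (r ∈ d ∨
      ∃ m ∈ lms, ∃ c ∈ [pvField m "runtime", pvField m "provider", pvField m "source"],
        PySem.Str.lower (PySem.Str.strip c) = r) := by
  induction lms generalizing d with
  | nil => simp
  | cons m lms ih =>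
    simp only [List.foldl_cons, ih, pv_mem_modelStep r hr, List.mem_cons]
    constructor
    · rintro ((hd | hex) | ⟨x, hx, hex⟩)
      · exact Or.inl hd
      · exact Or.inr ⟨m, Or.inl rfl, hex⟩
      · exact Or.inr ⟨x, Or.inr hx, hex⟩
    · rintro (hd | ⟨x, hx | hx, hex⟩)
      · exact Or.inl (Or.inl hd)
      · subst hx; exact Or.inl (Or.inr hex)
      · exact Or.inr ⟨x, hx, hex⟩

-- A's filter predicate coincides with B's rescan predicate on canonical r
theorem pv_pred_eq (r : String) (hr : r = "vllm" ∨ r = "ollama" ∨ r = "onnx")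
    (lms : List (List (String × String))) :
    PySem.Set.contains (lms.foldl pvModelStep PySem.Set.empty) r
    = lms.any (fun model =>
        [pvField model "runtime", pvField model "provider", pvField model "source"].any
          (fun field => PySem.Str.lower (PySem.Str.strip field) == r)) := by
  rw [Bool.eq_iff_iff]
  simp only [PySem.Set.contains, List.contains_iff_mem, List.any_eq_true, beq_iff_eq]
  rw [pv_mem_discovered r hr]
  simp [PySem.Set.empty]

-- ===== VERDICT (by name: the statement is the Claim_ definition above) =====
theorem discover_available_runtime_targets_spec : Claim_equal_discover_available_runtime_targets := by
  intro lms _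
  unfold Spec_discover_available_runtime_targets
  unfold discover_available_runtime_targets discover_available_runtime_targets_alt
  refine List.filter_congr ?_
  intro r hr
  have hr' : r = "vllm" ∨ r = "ollama" ∨ r = "onnx" := by
    simp only [List.mem_cons, List.not_mem_nil, or_false] at hr; tauto
  exact pv_pred_eq r hr' lms
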